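-- pv_equiv track=rewrite | github.com/AdelNehili/Seminar | src/ERP_Code.py | edit_distance_with_real_penalty_timeSeries
-- ===== SOURCE A (Python) =====
-- def edit_distance_with_real_penalty_timeSeries(source, target, gap_value=0):
--     n = len(source)
--     m = len(target)
--
--     # Create a distance matrix
--     dist = [[0 for _ in range(m + 1)] for _ in range(n + 1)]
--
--     # Initialize the first row and column of the matrix
--     for i in range(1, n + 1):
--         dist[i][0] = dist[i - 1][0] + abs(gap_value - source[i - 1])
--     for j in range(1, m + 1):
--         dist[0][j] = dist[0][j - 1] + abs(gap_value - target[j - 1])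
--
--
--
--     # Populate the distance matrix
--     for i in range(1, n + 1):
--         for j in range(1, m + 1):
--             cost_sub = abs(source[i - 1] - target[j - 1])
--             cost_del = abs(source[i - 1] - gap_value)
--             cost_ins = abs(target[j - 1] - gap_value)
--
--
--             dist[i][j] = min(dist[i - 1][j] + cost_del,    # Deletion, We use the horizontal path
--                              dist[i][j - 1] + cost_ins,    # Insertion, We use the vertical path
--                              dist[i - 1][j - 1] + cost_sub) # Substitution, We use the diaganole path
--     return dist[n][m]
-- ===== SOURCE B (Python) =====
-- def edit_distance_with_real_penalty_timeSeries(source, target, gap_value=0):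
--     # Anti-diagonal wavefront: process DP cells in order of d = i + j,
--     # keeping only the two most recent diagonals.
--     n, m = len(source), len(target)
--     prev2, prev1 = [], [0]  # diagonals d-2 and d-1 (diagonal 0 is [dist[0][0]] = [0])
--     for d in range(1, n + m + 1):
--         lo = max(0, d - m)          # smallest i on diagonal d
--         hi = min(d, n)              # largest i on diagonal d
--         lo1 = max(0, d - 1 - m)     # smallest i on diagonal d-1
--         lo2 = max(0, d - 2 - m)     # smallest i on diagonal d-2
--         curr = []
--         for i in range(lo, hi + 1):
--             j = d - i
--             if j == 0:
--                 curr.append(prev1[i - 1 - lo1] + abs(gap_value - source[i - 1]))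
--             elif i == 0:
--                 curr.append(prev1[0] + abs(gap_value - target[j - 1]))
--             else:
--                 curr.append(min(prev1[i - 1 - lo1] + abs(source[i - 1] - gap_value),
--                                 prev1[i - lo1] + abs(target[j - 1] - gap_value),
--                                 prev2[i - 1 - lo2] + abs(source[i - 1] - target[j - 1])))
--         prev2, prev1 = prev1, curr
--     return prev1[0]
-- ===== Notes on version B (the rewrite author's own statement) =====
-- stated objective: alternative
-- what changed: Replaces the row-major (n+1)x(m+1) DP matrix with an anti-diagonal wavefront sweep: cells are visited in order of i+j, keeping only the two most recent diagonals, so the traversal order and the state maintained are different while every cell value is the same.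
import Mathlib
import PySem

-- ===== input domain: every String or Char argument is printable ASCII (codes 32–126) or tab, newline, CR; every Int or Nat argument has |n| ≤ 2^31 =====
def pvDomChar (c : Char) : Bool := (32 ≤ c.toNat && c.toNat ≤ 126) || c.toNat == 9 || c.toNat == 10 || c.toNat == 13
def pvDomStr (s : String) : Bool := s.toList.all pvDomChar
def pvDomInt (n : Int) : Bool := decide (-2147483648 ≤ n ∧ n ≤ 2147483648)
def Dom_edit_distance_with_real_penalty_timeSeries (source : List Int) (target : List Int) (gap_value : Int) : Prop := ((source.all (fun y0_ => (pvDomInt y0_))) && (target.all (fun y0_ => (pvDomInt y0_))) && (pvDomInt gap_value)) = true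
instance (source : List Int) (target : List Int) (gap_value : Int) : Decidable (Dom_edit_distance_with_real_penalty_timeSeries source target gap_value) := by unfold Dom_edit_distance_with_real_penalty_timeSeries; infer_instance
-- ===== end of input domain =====

-- B replaces A's row-major (n+1)×(m+1) DP matrix by an anti-diagonal wavefront sweep
-- (cells visited in order of i+j, only the two most recent diagonals kept); same values.

-- ===== PORT A =====
-- A mutates a pre-allocated matrix cell by cell; the port models this by constructing
-- the column-0 list, row 0, and then each row in exactly Python's write order,
-- reading neighbours by index as the Python does (indices are always in range, so
-- pyGetD's default is never consulted).
def edit_distance_with_real_penalty_timeSeries (source : List Int) (target : List Int) (gap_value : Int) : Int :=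
  let n : Int := source.length
  let m : Int := target.length
  -- for i in range(1, n+1): dist[i][0] = dist[i-1][0] + abs(gap_value - source[i-1])
  let col0 := (PySem.List.pyRange 1 (n + 1) 1).foldl
    (fun c i => c ++ [PySem.List.pyGetD c (i - 1) 0 + |gap_value - PySem.List.pyGetD source (i - 1) 0|]) [0]
  -- for j in range(1, m+1): dist[0][j] = dist[0][j-1] + abs(gap_value - target[j-1])
  let row0 := (PySem.List.pyRange 1 (m + 1) 1).foldl
    (fun r j => r ++ [PySem.List.pyGetD r (j - 1) 0 + |gap_value - PySem.List.pyGetD target (j - 1) 0|]) [0]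
  -- for i in range(1, n+1): for j in range(1, m+1): dist[i][j] = min(..., ..., ...)
  let mat := (PySem.List.pyRange 1 (n + 1) 1).foldl
    (fun mat i =>
      let s := PySem.List.pyGetD source (i - 1) 0
      mat ++ [ (PySem.List.pyRange 1 (m + 1) 1).foldl
        (fun curr j =>
          let t := PySem.List.pyGetD target (j - 1) 0
          let cost_sub := |s - t|
          let cost_del := |s - gap_value|
          let cost_ins := |t - gap_value|
          curr ++ [min (min (PySem.List.pyGetD (PySem.List.pyGetD mat (i - 1) []) j 0 + cost_del)
                            (PySem.List.pyGetD curr (j - 1) 0 + cost_ins))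
                       (PySem.List.pyGetD (PySem.List.pyGetD mat (i - 1) []) (j - 1) 0 + cost_sub)])
        [PySem.List.pyGetD col0 i 0] ]) [row0]
  PySem.List.pyGetD (PySem.List.pyGetD mat n []) m 0

-- ===== PORT B =====
-- Wavefront: for d in range(1, n+m+1) build the diagonal of cells i+j = d (state =
-- the last two diagonals); curr.append under if/elif/else is the one conditional append.
def edit_distance_with_real_penalty_timeSeries_alt (source : List Int) (target : List Int) (gap_value : Int) : Int :=
  let n : Int := source.length
  let m : Int := target.length
  let st := (PySem.List.pyRange 1 (n + m + 1) 1).foldl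
    (fun (st : List Int × List Int) d =>
      let prev2 := st.1
      let prev1 := st.2
      let lo := max 0 (d - m)
      let hi := min d n
      let lo1 := max 0 (d - 1 - m)
      let lo2 := max 0 (d - 2 - m)
      let curr := (PySem.List.pyRange lo (hi + 1) 1).foldl
        (fun c i =>
          let j := d - i
          c ++ [if j = 0 then
                  PySem.List.pyGetD prev1 (i - 1 - lo1) 0 + |gap_value - PySem.List.pyGetD source (i - 1) 0|
                else if i = 0 then
                  PySem.List.pyGetD prev1 0 0 + |gap_value - PySem.List.pyGetD target (j - 1) 0|
                else
                  min (min (PySem.List.pyGetD prev1 (i - 1 - lo1) 0 + |PySem.List.pyGetD source (i - 1) 0 - gap_value|)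
                           (PySem.List.pyGetD prev1 (i - lo1) 0 + |PySem.List.pyGetD target (j - 1) 0 - gap_value|))
                      (PySem.List.pyGetD prev2 (i - 1 - lo2) 0 + |PySem.List.pyGetD source (i - 1) 0 - PySem.List.pyGetD target (j - 1) 0|)]) []
      (prev1, curr)) ([], [0])
  PySem.List.pyGetD st.2 0 0

-- ===== PRECONDITION & SPEC =====
def Spec_edit_distance_with_real_penalty_timeSeries (source : List Int) (target : List Int) (gap_value : Int) (out : Int) : Prop := out = edit_distance_with_real_penalty_timeSeries_alt source target gap_value
instance (source : List Int) (target : List Int) (gap_value : Int) (out : Int) : Decidable (Spec_edit_distance_with_real_penalty_timeSeries source target gap_value out) := by unfold Spec_edit_distance_with_real_penalty_timeSeries; infer_instance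

-- ===== CLAIM (what is proved, stated in full; the proofs are below) =====
def Claim_equal_edit_distance_with_real_penalty_timeSeries : Prop := ∀ (source : List Int) (target : List Int) (gap_value : Int), Dom_edit_distance_with_real_penalty_timeSeries source target gap_value → Spec_edit_distance_with_real_penalty_timeSeries source target gap_value (edit_distance_with_real_penalty_timeSeries source target gap_value)

-- ===== LEMMAS AND PROOFS =====

-- The pure ERP recurrence both programs tabulate: pvD i j = dist between the first
-- i source points and the first j target points.
def pvD (src tgt : List Int) (g : Int) : Nat → Nat → Int
  | 0, 0 => 0
  | i+1, 0 => pvD src tgt g i 0 + |g - src.getD i 0|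
  | 0, j+1 => pvD src tgt g 0 j + |g - tgt.getD j 0|
  | i+1, j+1 =>
      min (min (pvD src tgt g i (j+1) + |src.getD i 0 - g|)
               (pvD src tgt g (i+1) j + |tgt.getD j 0 - g|))
          (pvD src tgt g i j + |src.getD i 0 - tgt.getD j 0|)
  termination_by i j => (i, j)

-- Row 0 / column 0 as a list: running prefix sums of |gap - x|.
def pvInitRec (gap tot : Int) : List Int → List Int
  | [] => []
  | t :: ts => (tot + |gap - t|) :: pvInitRec gap (tot + |gap - t|) ts

-- One DP row past its first cell (the shape A's inner fold produces): `last` is the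
-- cell just written, the two list arguments walk the target and the previous row.
def pvRowRec (s gap last : Int) : List Int → List Int → List Int
  | t :: ts, diag :: up :: ps =>
      let v := min (up + |s - gap|) (min (last + |t - gap|) (diag + |s - t|))
      v :: pvRowRec s gap v ts (up :: ps)
  | _, _ => []

-- Named pieces of port A (bodies identical to the lambdas in the port).
def pvCol0 (gap_value : Int) (source : List Int) : List Int :=
  (PySem.List.pyRange 1 ((source.length : Int) + 1) 1).foldl
    (fun c i => c ++ [PySem.List.pyGetD c (i - 1) 0 + |gap_value - PySem.List.pyGetD source (i - 1) 0|]) [0]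

def pvRow0 (gap_value : Int) (target : List Int) : List Int :=
  (PySem.List.pyRange 1 ((target.length : Int) + 1) 1).foldl
    (fun r j => r ++ [PySem.List.pyGetD r (j - 1) 0 + |gap_value - PySem.List.pyGetD target (j - 1) 0|]) [0]

def pvStepA (gap_value : Int) (source target col0 : List Int) (mat : List (List Int)) (i : Int) : List (List Int) :=
  let s := PySem.List.pyGetD source (i - 1) 0
  mat ++ [ (PySem.List.pyRange 1 ((target.length : Int) + 1) 1).foldl
    (fun curr j =>
      let t := PySem.List.pyGetD target (j - 1) 0
      let cost_sub := |s - t|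
      let cost_del := |s - gap_value|
      let cost_ins := |t - gap_value|
      curr ++ [min (min (PySem.List.pyGetD (PySem.List.pyGetD mat (i - 1) []) j 0 + cost_del)
                        (PySem.List.pyGetD curr (j - 1) 0 + cost_ins))
                   (PySem.List.pyGetD (PySem.List.pyGetD mat (i - 1) []) (j - 1) 0 + cost_sub)])
    [PySem.List.pyGetD col0 i 0] ]

-- Named piece of port B (body identical to the outer lambda of the port).
def pvStepW (source target : List Int) (gap_value : Int) (st : List Int × List Int) (d : Int) : List Int × List Int :=
  let prev2 := st.1
  let prev1 := st.2
  let lo := max 0 (d - (target.length : Int))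
  let hi := min d (source.length : Int)
  let lo1 := max 0 (d - 1 - (target.length : Int))
  let lo2 := max 0 (d - 2 - (target.length : Int))
  let curr := (PySem.List.pyRange lo (hi + 1) 1).foldl
    (fun c i =>
      let j := d - i
      c ++ [if j = 0 then
              PySem.List.pyGetD prev1 (i - 1 - lo1) 0 + |gap_value - PySem.List.pyGetD source (i - 1) 0|
            else if i = 0 then
              PySem.List.pyGetD prev1 0 0 + |gap_value - PySem.List.pyGetD target (j - 1) 0|
            else
              min (min (PySem.List.pyGetD prev1 (i - 1 - lo1) 0 + |PySem.List.pyGetD source (i - 1) 0 - gap_value|)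
                       (PySem.List.pyGetD prev1 (i - lo1) 0 + |PySem.List.pyGetD target (j - 1) 0 - gap_value|))
                  (PySem.List.pyGetD prev2 (i - 1 - lo2) 0 + |PySem.List.pyGetD source (i - 1) 0 - PySem.List.pyGetD target (j - 1) 0|)]) []
  (prev1, curr)

-- The diagonal i + j = d of the DP table, as B maintains it.
def pvDiag (src tgt : List Int) (g : Int) (d : Int) : List Int :=
  (PySem.List.pyRange (max 0 (d - (tgt.length : Int))) (min d (src.length : Int) + 1) 1).map
    (fun i => pvD src tgt g i.toNat (d - i).toNat)

lemma portA_eq (source target : List Int) (gap_value : Int) :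
    edit_distance_with_real_penalty_timeSeries source target gap_value
      = PySem.List.pyGetD
          (PySem.List.pyGetD
            ((PySem.List.pyRange 1 ((source.length : Int) + 1) 1).foldl
              (pvStepA gap_value source target (pvCol0 gap_value source)) [pvRow0 gap_value target])
            (source.length : Int) [])
          (target.length : Int) 0 := rfl

lemma portB_eq (source target : List Int) (gap_value : Int) :
    edit_distance_with_real_penalty_timeSeries_alt source target gap_value
      = PySem.List.pyGetD
          ((PySem.List.pyRange 1 ((source.length : Int) + (target.length : Int) + 1) 1).foldl
            (pvStepW source target gap_value) ([], [0])).2 0 0 := rfl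

lemma pvInitRec_length (gap tot : Int) (ts : List Int) : (pvInitRec gap tot ts).length = ts.length := by
  induction ts generalizing tot with
  | nil => rfl
  | cons t ts ih => simp [pvInitRec, ih]

lemma pvRowRec_length (s gap : Int) (ts : List Int) :
    ∀ (ps : List Int) (l : Int), ps.length = ts.length + 1 → (pvRowRec s gap l ts ps).length = ts.length := by
  induction ts with
  | nil => intro ps l _; cases ps with
    | nil => rfl
    | cons p ps => cases ps <;> rfl
  | cons t ts ih =>
    intro ps l h
    match ps, h with
    | p1 :: p2 :: rest, h =>
      simp only [pvRowRec, List.length_cons]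
      rw [ih (p2 :: rest) _ (by simpa using h)]

-- row 0 / column 0, A's index-based fold
lemma pvInit_A (gap : Int) (tgt : List Int) :
    ∀ (fuel k : Nat), tgt.length = k + fuel →
    ∀ (acc : List Int) (l : Int), acc.length = k + 1 → PySem.List.pyGetD acc (k : Int) 0 = l →
    (PySem.List.pyRange ((k : Int) + 1) ((tgt.length : Int) + 1) 1).foldl
      (fun r j => r ++ [PySem.List.pyGetD r (j - 1) 0 + |gap - PySem.List.pyGetD tgt (j - 1) 0|]) acc
      = acc ++ pvInitRec gap l (tgt.drop k) := by
  intro fuel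
  induction fuel with
  | zero =>
    intro k hk acc l hlen hl
    have hk' : k = tgt.length := by omega
    subst hk'
    rw [PySem.List.pyRange_one_eq_nil (by omega)]
    simp [pvInitRec]
  | succ fuel ih =>
    intro k hk acc l hlen hl
    have hklt : k < tgt.length := by omega
    rw [PySem.List.pyRange_one_cons (by exact_mod_cast by omega)]
    simp only [List.foldl_cons]
    have h1 : (k : Int) + 1 - 1 = (k : Int) := by ring
    rw [h1, hl]
    have ht : PySem.List.pyGetD tgt (k : Int) 0 = tgt.getD k 0 := PySem.List.pyGetD_natCast tgt k 0
    rw [ht]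
    have hcast : (k : Int) + 1 + 1 = ((k + 1 : Nat) : Int) + 1 := by push_cast; ring
    rw [hcast]
    rw [ih (k + 1) (by omega) (acc ++ [l + |gap - tgt.getD k 0|]) (l + |gap - tgt.getD k 0|)
      (by simp [hlen]) (by
        rw [PySem.List.pyGetD_natCast]
        have : k + 1 = acc.length := by omega
        rw [this]
        simp)]
    rw [List.drop_eq_getElem_cons hklt]
    rw [List.getD_eq_getElem tgt 0 hklt] at *
    simp [pvInitRec, List.append_assoc]

-- A's inner (row-filling) fold
lemma pvRow_A (s gap : Int) (tgt prev : List Int) (hp : prev.length = tgt.length + 1) :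
    ∀ (fuel k : Nat), tgt.length = k + fuel →
    ∀ (acc : List Int) (l : Int), acc.length = k + 1 → PySem.List.pyGetD acc (k : Int) 0 = l →
    (PySem.List.pyRange ((k : Int) + 1) ((tgt.length : Int) + 1) 1).foldl
      (fun curr j =>
        curr ++ [min (min (PySem.List.pyGetD prev j 0 + |s - gap|)
                          (PySem.List.pyGetD curr (j - 1) 0 + |PySem.List.pyGetD tgt (j - 1) 0 - gap|))
                     (PySem.List.pyGetD prev (j - 1) 0 + |s - PySem.List.pyGetD tgt (j - 1) 0|)]) acc
      = acc ++ pvRowRec s gap l (tgt.drop k) (prev.drop k) := by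
  intro fuel
  induction fuel with
  | zero =>
    intro k hk acc l hlen hl
    have hk' : k = tgt.length := by omega
    subst hk'
    rw [PySem.List.pyRange_one_eq_nil (by omega)]
    simp only [List.drop_length, List.foldl_nil]
    have : pvRowRec s gap l [] (prev.drop tgt.length) = [] := by
      cases h : prev.drop tgt.length with
      | nil => rfl
      | cons a b => cases b <;> rfl
    rw [this, List.append_nil]
  | succ fuel ih =>
    intro k hk acc l hlen hl
    have hklt : k < tgt.length := by omega
    rw [PySem.List.pyRange_one_cons (by exact_mod_cast by omega)]
    simp only [List.foldl_cons]
    have h1 : (k : Int) + 1 - 1 = (k : Int) := by ring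
    rw [h1, hl]
    have ht : PySem.List.pyGetD tgt (k : Int) 0 = tgt[k] := by
      rw [PySem.List.pyGetD_natCast, List.getD_eq_getElem tgt 0 hklt]
    have hpk : PySem.List.pyGetD prev (k : Int) 0 = prev[k]'(by omega) := by
      rw [PySem.List.pyGetD_natCast, List.getD_eq_getElem prev 0 (by omega)]
    have hpk1 : PySem.List.pyGetD prev ((k : Int) + 1) 0 = prev[k + 1]'(by omega) := by
      have : (k : Int) + 1 = ((k + 1 : Nat) : Int) := by push_cast; ring
      rw [this, PySem.List.pyGetD_natCast, List.getD_eq_getElem prev 0 (by omega)]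
    rw [ht, hpk, hpk1]
    set v := min (min (prev[k + 1]'(by omega) + |s - gap|) (l + |tgt[k] - gap|)) (prev[k]'(by omega) + |s - tgt[k]|) with hv
    have hcast : (k : Int) + 1 + 1 = ((k + 1 : Nat) : Int) + 1 := by push_cast; ring
    rw [hcast]
    rw [ih (k + 1) (by omega) (acc ++ [v]) v (by simp [hlen]) (by
      rw [PySem.List.pyGetD_natCast]
      have : k + 1 = acc.length := by omega
      rw [this]
      simp)]
    rw [List.drop_eq_getElem_cons hklt, List.drop_eq_getElem_cons (show k < prev.length by omega)]
    have hpd : prev.drop (k + 1) = prev[k + 1]'(by omega) :: prev.drop (k + 2) :=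
      List.drop_eq_getElem_cons (by omega)
    rw [hpd]
    simp only [pvRowRec, List.append_assoc, List.singleton_append]
    congr 2
    · rw [hv]; rw [min_assoc]
    · rw [hv]; rw [min_assoc]

lemma pvCol0_eq (gap : Int) (src : List Int) : pvCol0 gap src = 0 :: pvInitRec gap 0 src := by
  unfold pvCol0
  have := pvInit_A gap src src.length 0 (by omega) [0] 0 (by simp) (by simp [PySem.List.pyGetD_zero_cons])
  simpa using this

lemma pvRow0_eq (gap : Int) (tgt : List Int) : pvRow0 gap tgt = 0 :: pvInitRec gap 0 tgt := by
  unfold pvRow0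
  have := pvInit_A gap tgt tgt.length 0 (by omega) [0] 0 (by simp) (by simp [PySem.List.pyGetD_zero_cons])
  simpa using this

-- the prefix-sum list's recurrence
lemma pvCol0_getD (gap : Int) (src : List Int) :
    ∀ (k : Nat) (tot : Int), k < src.length →
    (tot :: pvInitRec gap tot src).getD (k + 1) 0
      = (tot :: pvInitRec gap tot src).getD k 0 + |gap - src.getD k 0| := by
  induction src with
  | nil => intro k tot h; simp at h
  | cons t ts ih =>
    intro k tot h
    cases k with
    | zero => simp [pvInitRec]
    | succ k =>
      have := ih k (tot + |gap - t|) (by simpa using h)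
      simpa [pvInitRec] using this

-- the prefix-sum list computes any F satisfying the same recurrence
lemma pvInit_pointwise (g : Int) (xs : List Int) (F : Nat → Int) (h0 : F 0 = 0)
    (hs : ∀ q, q < xs.length → F (q + 1) = F q + |g - xs.getD q 0|) :
    ∀ q, q ≤ xs.length → (0 :: pvInitRec g 0 xs).getD q 0 = F q := by
  intro q
  induction q with
  | zero => intro _; simpa using h0.symm
  | succ q ih =>
    intro h
    rw [pvCol0_getD g xs q 0 (by omega), ih (by omega), hs q (by omega)]

-- pvRowRec computes row k+1 of pvD from row k
lemma pvRowRec_getD (src tgt : List Int) (g : Int) (k : Nat) (prev : List Int)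
    (hp : prev.length = tgt.length + 1)
    (hq : ∀ q, q ≤ tgt.length → prev.getD q 0 = pvD src tgt g k q) :
    ∀ (fuel : Nat), ∀ (j : Nat), tgt.length = j + fuel →
    ∀ (last : Int), last = pvD src tgt g (k + 1) j →
    ∀ l, l < fuel →
    (pvRowRec (src.getD k 0) g last (tgt.drop j) (prev.drop j)).getD l 0
      = pvD src tgt g (k + 1) (j + 1 + l) := by
  intro fuel
  induction fuel with
  | zero => intro j _ last _ l hl; omega
  | succ fuel ih =>
    intro j hj last hlast l hl
    have hjlt : j < tgt.length := by omega
    have hj1 : j + 1 < prev.length := by omega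
    rw [List.drop_eq_getElem_cons hjlt, List.drop_eq_getElem_cons (show j < prev.length by omega)]
    have hpd : prev.drop (j + 1) = prev[j + 1]'hj1 :: prev.drop (j + 2) :=
      List.drop_eq_getElem_cons hj1
    rw [hpd]
    simp only [pvRowRec]
    have hup : prev[j + 1]'hj1 = pvD src tgt g k (j + 1) := by
      rw [← List.getD_eq_getElem prev 0 hj1]; exact hq (j + 1) (by omega)
    have hdiag : prev[j]'(by omega) = pvD src tgt g k j := by
      rw [← List.getD_eq_getElem prev 0 (by omega)]; exact hq j (by omega)
    have htj : tgt[j]'hjlt = tgt.getD j 0 := (List.getD_eq_getElem tgt 0 hjlt).symm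
    have hv : min (prev[j + 1]'hj1 + |src.getD k 0 - g|)
        (min (last + |tgt[j]'hjlt - g|) (prev[j]'(by omega) + |src.getD k 0 - tgt[j]'hjlt|))
        = pvD src tgt g (k + 1) (j + 1) := by
      rw [hup, hdiag, htj, hlast, ← min_assoc]
      simp [pvD]
    cases l with
    | zero => simpa using hv
    | succ l =>
      have := ih (j + 1) (by omega) (pvD src tgt g (k + 1) (j + 1)) rfl l (by omega)
      rw [hpd] at this
      simp only [List.getD_cons_succ]
      rw [hv]
      convert this using 2
      omega

-- outer induction for A: the final row of the matrix fold is row n of pvD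
lemma pvOuterA (src tgt : List Int) (g : Int)
    (hc : ∀ i : Nat, i ≤ src.length → (pvCol0 g src).getD i 0 = pvD src tgt g i 0) :
    ∀ (fuel k : Nat), src.length = k + fuel →
    ∀ (mat : List (List Int)), mat.length = k + 1 →
    (mat.getD k []).length = tgt.length + 1 →
    (∀ q, q ≤ tgt.length → (mat.getD k []).getD q 0 = pvD src tgt g k q) →
    (((PySem.List.pyRange ((k : Int) + 1) ((src.length : Int) + 1) 1).foldl
        (pvStepA g src tgt (pvCol0 g src)) mat).getD src.length []).length = tgt.length + 1 ∧
    ∀ q, q ≤ tgt.length →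
      (((PySem.List.pyRange ((k : Int) + 1) ((src.length : Int) + 1) 1).foldl
          (pvStepA g src tgt (pvCol0 g src)) mat).getD src.length []).getD q 0
        = pvD src tgt g src.length q := by
  intro fuel
  induction fuel with
  | zero =>
    intro k hk mat hlen hrl hrow
    have hk' : k = src.length := by omega
    subst hk'
    rw [PySem.List.pyRange_one_eq_nil (by omega)]
    simp only [List.foldl_nil]
    exact ⟨hrl, hrow⟩
  | succ fuel ih =>
    intro k hk mat hlen hrl hrow
    have hklt : k < src.length := by omega
    rw [PySem.List.pyRange_one_cons (by exact_mod_cast by omega)]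
    simp only [List.foldl_cons]
    set prevRow := mat.getD k [] with hprev
    set s := src.getD k 0 with hs
    set c0 := pvD src tgt g (k + 1) 0 with hc0
    have hstep : pvStepA g src tgt (pvCol0 g src) mat ((k : Int) + 1)
        = mat ++ [c0 :: pvRowRec s g c0 tgt prevRow] := by
      unfold pvStepA
      have h1 : (k : Int) + 1 - 1 = (k : Int) := by ring
      have hsrc : PySem.List.pyGetD src ((k : Int) + 1 - 1) 0 = s := by
        rw [h1, PySem.List.pyGetD_natCast]
      have hmat : PySem.List.pyGetD mat ((k : Int) + 1 - 1) [] = prevRow := by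
        rw [h1, PySem.List.pyGetD_natCast]
      have hseed : PySem.List.pyGetD (pvCol0 g src) ((k : Int) + 1) 0 = c0 := by
        have : (k : Int) + 1 = ((k + 1 : Nat) : Int) := by push_cast; ring
        rw [this, PySem.List.pyGetD_natCast]
        exact hc (k + 1) (by omega)
      simp only [hsrc, hmat, hseed]
      congr 1
      have := pvRow_A s g tgt prevRow hrl tgt.length 0 (by omega) [c0] c0 (by simp)
        (by simp [PySem.List.pyGetD_zero_cons])
      simp only [Nat.cast_zero, zero_add, List.drop_zero] at this
      rw [this]
      simp
    rw [hstep]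
    have hrl' : (c0 :: pvRowRec s g c0 tgt prevRow).length = tgt.length + 1 := by
      simp [pvRowRec_length s g tgt prevRow _ hrl]
    have hrow' : ∀ q, q ≤ tgt.length →
        ((mat ++ [c0 :: pvRowRec s g c0 tgt prevRow]).getD (k + 1) []).getD q 0
          = pvD src tgt g (k + 1) q := by
      have hget : (mat ++ [c0 :: pvRowRec s g c0 tgt prevRow]).getD (k + 1) []
          = c0 :: pvRowRec s g c0 tgt prevRow := by
        have : k + 1 = mat.length := by omega
        rw [this]
        simp
      rw [hget]
      intro q hqle
      cases q with
      | zero => simp [hc0]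
      | succ q =>
        simp only [List.getD_cons_succ]
        have := pvRowRec_getD src tgt g k prevRow hrl hrow tgt.length 0 (by omega) c0 hc0 q (by omega)
        simp only [List.drop_zero] at this
        rw [this]
        congr 1
        omega
    have hcast : (k : Int) + 1 + 1 = ((k + 1 : Nat) : Int) + 1 := by push_cast; ring
    rw [hcast]
    refine ih (k + 1) (by omega) (mat ++ [c0 :: pvRowRec s g c0 tgt prevRow])
      (by simp [hlen]) ?_ hrow'
    have hget : (mat ++ [c0 :: pvRowRec s g c0 tgt prevRow]).getD (k + 1) []
        = c0 :: pvRowRec s g c0 tgt prevRow := by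
      have : k + 1 = mat.length := by omega
      rw [this]; simp
    rw [hget]; exact hrl'

lemma pvA_eq_pvD (src tgt : List Int) (g : Int) :
    edit_distance_with_real_penalty_timeSeries src tgt g = pvD src tgt g src.length tgt.length := by
  rw [portA_eq]
  have hc : ∀ i : Nat, i ≤ src.length → (pvCol0 g src).getD i 0 = pvD src tgt g i 0 := by
    rw [pvCol0_eq]
    exact pvInit_pointwise g src (fun i => pvD src tgt g i 0) (by simp [pvD]) (fun q _ => by simp [pvD])
  have hrow0 : ∀ q, q ≤ tgt.length → (pvRow0 g tgt).getD q 0 = pvD src tgt g 0 q := by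
    rw [pvRow0_eq]
    exact pvInit_pointwise g tgt (fun j => pvD src tgt g 0 j) (by simp [pvD]) (fun q _ => by simp [pvD])
  have h0 := pvOuterA src tgt g hc src.length 0 (by omega) [pvRow0 g tgt] (by simp)
    (by simp [pvRow0_eq, pvInitRec_length])
    (by simpa using hrow0)
  simp only [Nat.cast_zero, zero_add] at h0
  rw [PySem.List.pyGetD_natCast, PySem.List.pyGetD_natCast]
  exact h0.2 tgt.length (by omega)

-- ===== B side =====

lemma pvGetD_map_range (a b : Int) (f : Int → Int) (k : Int) (h0 : 0 ≤ k) (h1 : k < b - a) :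
    PySem.List.pyGetD ((PySem.List.pyRange a b 1).map f) k 0 = f (a + k) := by
  obtain ⟨kn, rfl⟩ : ∃ kn : Nat, (kn : Int) = k := ⟨k.toNat, Int.toNat_of_nonneg h0⟩
  exact PySem.List.pyGetD_map_pyRange_one f a b kn 0 (by omega)

lemma pvDiag_neg_one (src tgt : List Int) (g : Int) : pvDiag src tgt g (-1) = [] := by
  unfold pvDiag
  rw [PySem.List.pyRange_one_eq_nil (by
    have : min (-1 : Int) (src.length : Int) = -1 := by omega
    omega)]
  rfl

lemma pvDiag_zero (src tgt : List Int) (g : Int) : pvDiag src tgt g 0 = [0] := by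
  unfold pvDiag
  have h1 : max (0 : Int) (0 - (tgt.length : Int)) = 0 := by omega
  have h2 : min (0 : Int) (src.length : Int) = 0 := by omega
  rw [h1, h2, PySem.List.pyRange_one_singleton]
  simp [pvD]

-- one wavefront step advances the diagonal pair
lemma pvStepW_diag (src tgt : List Int) (g : Int) (d : Int)
    (h1 : 1 ≤ d) (_h2 : d ≤ (src.length : Int) + (tgt.length : Int)) :
    pvStepW src tgt g (pvDiag src tgt g (d - 2), pvDiag src tgt g (d - 1)) d
      = (pvDiag src tgt g (d - 1), pvDiag src tgt g d) := by
  set n : Int := (src.length : Int) with hn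
  set m : Int := (tgt.length : Int) with hm
  have hn0 : 0 ≤ n := by positivity
  have hm0 : 0 ≤ m := by positivity
  unfold pvStepW
  simp only
  refine Prod.ext rfl ?_
  rw [PySem.List.foldl_append_singleton_eq_map]
  rw [show pvDiag src tgt g d
      = (PySem.List.pyRange (max 0 (d - m)) (min d n + 1) 1).map
          (fun i => pvD src tgt g i.toNat (d - i).toNat) from rfl]
  simp only [List.nil_append]
  refine List.map_congr_left ?_
  intro i hi
  rw [PySem.List.mem_pyRange_one] at hi
  obtain ⟨hilo, hihi⟩ := hi
  have hi0 : 0 ≤ i := le_trans (le_max_left _ _) hilo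
  have hin : i ≤ n := by omega
  have hid : i ≤ d := by omega
  have him : d - i ≤ m := by
    have := le_trans (le_max_right _ _) hilo
    omega
  by_cases hj0 : d - i = 0
  · -- j == 0 : i = d ≥ 1
    rw [if_pos hj0]
    obtain ⟨aN, haN⟩ : ∃ a : Nat, (a : Int) = i - 1 := ⟨(i - 1).toNat, Int.toNat_of_nonneg (by omega)⟩
    have hget : PySem.List.pyGetD (pvDiag src tgt g (d - 1)) (i - 1 - max 0 (d - 1 - m)) 0
        = pvD src tgt g aN 0 := by
      unfold pvDiag
      rw [pvGetD_map_range _ _ _ _ (by omega) (by omega)]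
      congr 2 <;> omega
    have hsrc : PySem.List.pyGetD src (i - 1) 0 = src.getD aN 0 := by
      rw [← haN, PySem.List.pyGetD_natCast]
    rw [hget, hsrc, show (d - i).toNat = 0 from by omega, show i.toNat = aN + 1 from by omega]
    simp [pvD]
  · by_cases hi0' : i = 0
    · -- i == 0 : j = d ≥ 1
      rw [if_neg hj0, hi0', if_pos rfl]
      obtain ⟨bN, hbN⟩ : ∃ b : Nat, (b : Int) = d - 1 := ⟨(d - 1).toNat, Int.toNat_of_nonneg (by omega)⟩
      have hget : PySem.List.pyGetD (pvDiag src tgt g (d - 1)) 0 0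
          = pvD src tgt g 0 bN := by
        unfold pvDiag
        rw [pvGetD_map_range _ _ _ _ (by omega) (by
          have : max (0:Int) (d - 1 - m) = 0 := by omega
          omega)]
        congr 2 <;> omega
      have htgt : PySem.List.pyGetD tgt (d - 0 - 1) 0 = tgt.getD bN 0 := by
        rw [show d - (0:Int) - 1 = ((bN : Int)) from by omega, PySem.List.pyGetD_natCast]
      rw [hget, htgt, show ((0:Int)).toNat = 0 from rfl, show (d - 0).toNat = bN + 1 from by omega]
      simp [pvD]
    · -- interior: i ≥ 1, j ≥ 1, d ≥ 2
      rw [if_neg hj0, if_neg hi0']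
      have hi1 : 1 ≤ i := by omega
      have hd2 : 2 ≤ d := by omega
      obtain ⟨aN, haN⟩ : ∃ a : Nat, (a : Int) = i - 1 := ⟨(i - 1).toNat, Int.toNat_of_nonneg (by omega)⟩
      obtain ⟨bN, hbN⟩ : ∃ b : Nat, (b : Int) = d - i - 1 := ⟨(d - i - 1).toNat, Int.toNat_of_nonneg (by omega)⟩
      have hup : PySem.List.pyGetD (pvDiag src tgt g (d - 1)) (i - 1 - max 0 (d - 1 - m)) 0
          = pvD src tgt g aN (bN + 1) := by
        unfold pvDiag
        rw [pvGetD_map_range _ _ _ _ (by omega) (by omega)]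
        congr 2 <;> omega
      have hleft : PySem.List.pyGetD (pvDiag src tgt g (d - 1)) (i - max 0 (d - 1 - m)) 0
          = pvD src tgt g (aN + 1) bN := by
        unfold pvDiag
        rw [pvGetD_map_range _ _ _ _ (by omega) (by omega)]
        congr 2 <;> omega
      have hdg : PySem.List.pyGetD (pvDiag src tgt g (d - 2)) (i - 1 - max 0 (d - 2 - m)) 0
          = pvD src tgt g aN bN := by
        unfold pvDiag
        rw [pvGetD_map_range _ _ _ _ (by omega) (by omega)]
        congr 2 <;> omega
      have hsrc : PySem.List.pyGetD src (i - 1) 0 = src.getD aN 0 := by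
        rw [← haN, PySem.List.pyGetD_natCast]
      have htgt : PySem.List.pyGetD tgt (d - i - 1) 0 = tgt.getD bN 0 := by
        rw [← hbN, PySem.List.pyGetD_natCast]
      rw [hup, hleft, hdg, hsrc, htgt,
          show i.toNat = aN + 1 from by omega, show (d - i).toNat = bN + 1 from by omega]
      simp [pvD]

-- outer induction for B
lemma pvLoopW (src tgt : List Int) (g : Int) :
    ∀ (fuel : Nat) (d : Int), 0 ≤ d → d + fuel = (src.length : Int) + (tgt.length : Int) →
    (PySem.List.pyRange (d + 1) ((src.length : Int) + (tgt.length : Int) + 1) 1).foldl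
        (pvStepW src tgt g) (pvDiag src tgt g (d - 1), pvDiag src tgt g d)
      = (pvDiag src tgt g ((src.length : Int) + (tgt.length : Int) - 1),
         pvDiag src tgt g ((src.length : Int) + (tgt.length : Int))) := by
  intro fuel
  induction fuel with
  | zero =>
    intro d h0 hsum
    rw [PySem.List.pyRange_one_eq_nil (by omega)]
    simp only [List.foldl_nil]
    rw [show (src.length : Int) + (tgt.length : Int) - 1 = d - 1 by omega,
        show (src.length : Int) + (tgt.length : Int) = d by omega]
  | succ fuel ih =>
    intro d h0 hsum
    rw [PySem.List.pyRange_one_cons (by omega)]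
    simp only [List.foldl_cons]
    have hstep := pvStepW_diag src tgt g (d + 1) (by omega) (by omega)
    rw [show d + 1 - 2 = d - 1 by ring, show d + 1 - 1 = d by ring] at hstep
    rw [hstep]
    have := ih (d + 1) (by omega) (by omega)
    rw [show d + 1 - 1 = d by ring] at this
    exact this

lemma pvB_eq_pvD (src tgt : List Int) (g : Int) :
    edit_distance_with_real_penalty_timeSeries_alt src tgt g = pvD src tgt g src.length tgt.length := by
  rw [portB_eq]
  have hL := pvLoopW src tgt g (src.length + tgt.length) 0 (by omega) (by push_cast; ring)
  rw [show (0 : Int) + 1 = 1 from by ring, show (0 : Int) - 1 = -1 from by ring,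
      pvDiag_neg_one, pvDiag_zero] at hL
  rw [hL]
  simp only
  unfold pvDiag
  have h1 : max (0 : Int) ((src.length : Int) + (tgt.length : Int) - (tgt.length : Int))
      = (src.length : Int) := by omega
  rw [h1, show min ((src.length : Int) + (tgt.length : Int)) ((src.length : Int))
      = (src.length : Int) from by omega, PySem.List.pyRange_one_singleton]
  simp only [List.map_cons, List.map_nil, PySem.List.pyGetD_zero_cons]
  congr 1
  omega

lemma pvMain (source target : List Int) (gap_value : Int) :
    edit_distance_with_real_penalty_timeSeries source target gap_value
      = edit_distance_with_real_penalty_timeSeries_alt source target gap_value := by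
  rw [pvA_eq_pvD, pvB_eq_pvD]

-- ===== VERDICT (by name: the statement is the Claim_ definition above) =====
theorem edit_distance_with_real_penalty_timeSeries_spec : Claim_equal_edit_distance_with_real_penalty_timeSeries := by
  intro source target gap_value _
  unfold Spec_edit_distance_with_real_penalty_timeSeries
  exact pvMain source target gap_value
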